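-- pv_equiv track=rewrite | github.com/jcolinpatrick/kryptos | scripts/transposition/other/e_s_12_reading_orders.py | boustrophedon
-- ===== SOURCE A (Python) =====
-- def boustrophedon(n, width):
--     """Serpentine reading: L→R on even rows, R→L on odd rows."""
--     order = []
--     n_rows = (n + width - 1) // width
--     for row in range(n_rows):
--         start = row * width
--         end = min(start + width, n)
--         if row % 2 == 0:
--             order.extend(range(start, end))
--         else:
--             order.extend(range(end - 1, start - 1, -1))
--     return order
-- ===== SOURCE B (Python) =====
-- def boustrophedon(n, width):
--     """Serpentine reading: L→R on even rows, R→L on odd rows."""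
--     if width <= 0:
--         return []
--
--     def place(k):
--         row, j = divmod(k, width)
--         if row % 2 == 0:
--             return k
--         return min((row + 1) * width, n) - 1 - j
--
--     return [place(k) for k in range(n)]
-- ===== Notes on version B (the rewrite author's own statement) =====
-- stated objective: alternative
-- what changed: B computes each output position directly by a closed-form arithmetic formula (row = k//width, reversed offset on odd rows) mapped over range(n), instead of A's row loop that extends the output with forward or backward range segments per row.
import Mathlib
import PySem

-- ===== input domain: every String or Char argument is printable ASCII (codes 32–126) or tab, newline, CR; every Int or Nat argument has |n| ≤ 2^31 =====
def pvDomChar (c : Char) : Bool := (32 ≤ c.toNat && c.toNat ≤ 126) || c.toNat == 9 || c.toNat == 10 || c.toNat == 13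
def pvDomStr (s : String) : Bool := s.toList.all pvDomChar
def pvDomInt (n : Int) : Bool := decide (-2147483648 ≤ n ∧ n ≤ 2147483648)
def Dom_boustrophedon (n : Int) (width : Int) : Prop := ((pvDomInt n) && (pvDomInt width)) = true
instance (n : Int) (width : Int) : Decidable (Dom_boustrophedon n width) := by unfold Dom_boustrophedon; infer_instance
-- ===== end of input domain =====

-- B replaces A's per-row segment-appending loop by a closed-form per-position formula
-- mapped over range(n) (objective: alternative decomposition, same O(n) cost).
-- A raises ZeroDivisionError for width = 0 (excluded by Pre_); B returns [] there.

-- ===== PORT A =====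
def boustrophedon (n : Int) (width : Int) : List Int :=
  let nRows := PySem.Int.floordiv (n + width - 1) width
  (PySem.List.pyRange 0 nRows 1).foldl
    (fun order row =>
      let start := row * width
      let e := min (start + width) n
      if PySem.Int.mod row 2 = 0 then
        order ++ PySem.List.pyRange start e 1
      else
        order ++ PySem.List.pyRange (e - 1) (start - 1) (-1))
    []

-- ===== PORT B =====
def boustrophedon_alt (n : Int) (width : Int) : List Int :=
  if width ≤ 0 then []
  else
    (PySem.List.pyRange 0 n 1).map (fun k =>
      let row := PySem.Int.floordiv k width
      let j := PySem.Int.mod k width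
      if PySem.Int.mod row 2 = 0 then k
      else min ((row + 1) * width) n - 1 - j)

-- ===== PRECONDITION & SPEC =====
-- Pre_ excludes exactly width = 0, where A raises ZeroDivisionError.
def Pre_boustrophedon (n : Int) (width : Int) : Prop := width ≠ 0
instance (n : Int) (width : Int) : Decidable (Pre_boustrophedon n width) := by unfold Pre_boustrophedon; infer_instance
def pvWitness_boustrophedon : Int × Int := (7, 3)

def Spec_boustrophedon (n : Int) (width : Int) (out : List Int) : Prop := out = boustrophedon_alt n width
instance (n : Int) (width : Int) (out : List Int) : Decidable (Spec_boustrophedon n width out) := by unfold Spec_boustrophedon; infer_instance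

-- ===== CLAIM (what is proved, stated in full; the proofs are below) =====
def Claim_equal_boustrophedon : Prop := ∀ (n : Int) (width : Int), Dom_boustrophedon n width → Pre_boustrophedon n width → Spec_boustrophedon n width (boustrophedon n width)

-- ===== LEMMAS AND PROOFS =====

-- A's per-row segment.
def pvSeg (n width row : Int) : List Int :=
  if PySem.Int.mod row 2 = 0 then
    PySem.List.pyRange (row * width) (min (row * width + width) n) 1
  else
    PySem.List.pyRange (min (row * width + width) n - 1) (row * width - 1) (-1)

-- B's per-position formula.
def pvF (n width k : Int) : Int :=
  if PySem.Int.mod (PySem.Int.floordiv k width) 2 = 0 then k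
  else min ((PySem.Int.floordiv k width + 1) * width) n - 1 - PySem.Int.mod k width

theorem pv_A_eq_flatMap (n width : Int) :
    boustrophedon n width =
      (PySem.List.pyRange 0 (PySem.Int.floordiv (n + width - 1) width) 1).flatMap
        (pvSeg n width) := by
  unfold boustrophedon
  rw [show (fun (order : List Int) (row : Int) =>
      let start := row * width
      let e := min (start + width) n
      if PySem.Int.mod row 2 = 0 then
        order ++ PySem.List.pyRange start e 1
      else
        order ++ PySem.List.pyRange (e - 1) (start - 1) (-1)) =
      (fun order row => order ++ pvSeg n width row) from by
    funext order row
    dsimp only [pvSeg]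
    split <;> rfl]
  rw [PySem.List.foldl_append_eq_flatMap]
  rfl

theorem pv_seg_neg (n width : Int) (hw : width < 0) (row : Int) :
    pvSeg n width row = [] := by
  unfold pvSeg
  have h1 : min (row * width + width) n ≤ row * width + width := min_le_left _ _
  split
  · exact PySem.List.pyRange_one_eq_nil (by omega)
  · exact PySem.List.pyRange_neg_one_eq_nil (by omega)

theorem pv_seg_eq_map (n width : Int) (hw : 0 < width) (row : Int) :
    pvSeg n width row =
      (PySem.List.pyRange (row * width) (min ((row + 1) * width) n) 1).map (pvF n width) := by
  have hfd : ∀ k : Int, row * width ≤ k → k < (row + 1) * width →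
      PySem.Int.floordiv k width = row := by
    intro k h1 h2
    rw [PySem.Int.floordiv_eq_iff_of_pos hw]
    constructor <;> omega
  have hmod : ∀ k : Int, row * width ≤ k → k < (row + 1) * width →
      PySem.Int.mod k width = k - row * width := by
    intro k h1 h2
    have := PySem.Int.floordiv_mul_add_mod k width
    rw [hfd k h1 h2] at this
    omega
  have hmin : min (row * width + width) n = min ((row + 1) * width) n := by
    have : row * width + width = (row + 1) * width := by ring
    rw [this]
  unfold pvSeg
  rw [show min (row * width + width) n = min ((row + 1) * width) n from hmin]
  set e := min ((row + 1) * width) n with he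
  have heub : e ≤ (row + 1) * width := by rw [he]; exact min_le_left _ _
  split
  · -- even row: the map is the identity on the range
    rename_i hrow
    symm
    conv_rhs => rw [← List.map_id (PySem.List.pyRange (row * width) e 1)]
    apply List.map_congr_left
    intro k hk
    rw [PySem.List.mem_pyRange_one] at hk
    have h2 : k < (row + 1) * width := lt_of_lt_of_le hk.2 heub
    unfold pvF
    rw [hfd k hk.1 h2, if_pos hrow]
    rfl
  · -- odd row: the map reverses the forward range
    rename_i hrow
    rw [PySem.List.pyRange_neg_one_eq_reverse]
    rw [show e - 1 + 1 = e from by omega, show row * width - 1 + 1 = row * width from by omega]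
    apply List.ext_getElem
    · simp
    · intro i hi1 hi2
      simp only [List.length_reverse, PySem.List.length_pyRange_one] at hi1
      rw [List.getElem_reverse, List.getElem_map]
      rw [PySem.List.getElem_pyRange_one, PySem.List.getElem_pyRange_one]
      have hi' : (i : Int) < e - row * width := by omega
      have h1 : row * width ≤ row * width + (i : Int) := by omega
      have h2 : row * width + (i : Int) < (row + 1) * width := by omega
      simp only [pvF, hfd _ h1 h2, hmod _ h1 h2, if_neg hrow, ← he,
        PySem.List.length_pyRange_one]
      omega

theorem pv_rows_flat (width : Int) (hw : 0 < width) :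
    ∀ (r : Nat) (n : Int), n ≤ (r : Int) * width →
      (PySem.List.pyRange 0 (r : Int) 1).flatMap
          (fun row => PySem.List.pyRange (row * width) (min ((row + 1) * width) n) 1) =
        PySem.List.pyRange 0 n 1 := by
  intro r
  induction r with
  | zero =>
    intro n hn
    simp only [Nat.cast_zero, zero_mul] at hn ⊢
    rw [PySem.List.pyRange_one_eq_nil le_rfl, PySem.List.pyRange_one_eq_nil hn]
    simp
  | succ r ih =>
    intro n hn
    have hr0 : (0 : Int) ≤ (r : Int) := by positivity
    have hsucc : ((r + 1 : Nat) : Int) = (r : Int) + 1 := by push_cast; ring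
    rw [hsucc, PySem.List.pyRange_one_succ_right (by omega), List.flatMap_append]
    set m := min ((r : Int) * width) n with hm
    have hmle : m ≤ (r : Int) * width := min_le_left _ _
    have hcongr :
        (PySem.List.pyRange 0 (r : Int) 1).flatMap
            (fun row => PySem.List.pyRange (row * width) (min ((row + 1) * width) n) 1) =
          (PySem.List.pyRange 0 (r : Int) 1).flatMap
            (fun row => PySem.List.pyRange (row * width) (min ((row + 1) * width) m) 1) := by
      apply List.flatMap_congr
      intro row hrow
      rw [PySem.List.mem_pyRange_one] at hrow
      have hrw : (row + 1) * width ≤ (r : Int) * width := by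
        apply mul_le_mul_of_nonneg_right _ (le_of_lt hw); omega
      congr 1
      omega
    rw [hcongr, ih m (by omega)]
    simp only [List.flatMap_cons, List.flatMap_nil, List.append_nil]
    rcases le_or_gt n ((r : Int) * width) with hc | hc
    · have hm_eq : m = n := by omega
      have hlast : min (((r : Int) + 1) * width) n = n := by
        rw [hsucc] at hn; omega
      rw [hm_eq, hlast, PySem.List.pyRange_one_eq_nil hc, List.append_nil]
    · have hm_eq : m = (r : Int) * width := by omega
      have hlast : min (((r : Int) + 1) * width) n = n := by
        rw [hsucc] at hn; omega
      rw [hm_eq, hlast]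
      exact (PySem.List.pyRange_one_append 0 ((r : Int) * width) n (by positivity) (by omega)).symm

theorem pv_main_pos (n width : Int) (hw : 0 < width) :
    boustrophedon n width = boustrophedon_alt n width := by
  rw [pv_A_eq_flatMap]
  unfold boustrophedon_alt
  rw [if_neg (by omega)]
  set nR := PySem.Int.floordiv (n + width - 1) width with hnR
  rcases le_or_gt n 0 with hn | hn
  · -- n ≤ 0 : both sides empty
    have hR : nR < 1 := by
      rw [hnR, PySem.Int.floordiv_lt_iff_lt_mul hw]; omega
    rw [PySem.List.pyRange_one_eq_nil (show n ≤ 0 from hn),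
        PySem.List.pyRange_one_eq_nil (show nR ≤ 0 from by omega)]
    simp
  · -- n ≥ 1 : nR = ceil(n/width) ≥ 1
    have hR1 : 1 ≤ nR := by
      rw [hnR, PySem.Int.le_floordiv_iff_mul_le hw]; omega
    have hRub : n ≤ nR * width := by
      have h1 := (PySem.Int.floordiv_eq_iff_of_pos hw (a := n + width - 1) (q := nR)).mp hnR.symm
      have h2 : (nR + 1) * width = nR * width + width := by ring
      omega
    have hcast : ((nR.toNat : Int)) = nR := Int.toNat_of_nonneg (by omega)
    have hflat := pv_rows_flat width hw nR.toNat n (by rw [hcast]; exact hRub)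
    rw [hcast] at hflat
    calc (PySem.List.pyRange 0 nR 1).flatMap (pvSeg n width)
        = (PySem.List.pyRange 0 nR 1).flatMap
            (fun row => (PySem.List.pyRange (row * width) (min ((row + 1) * width) n) 1).map
              (pvF n width)) := by
          apply List.flatMap_congr
          intro row _
          exact pv_seg_eq_map n width hw row
      _ = ((PySem.List.pyRange 0 nR 1).flatMap
            (fun row => PySem.List.pyRange (row * width) (min ((row + 1) * width) n) 1)).map
              (pvF n width) := by
          rw [List.map_flatMap]
      _ = (PySem.List.pyRange 0 n 1).map (pvF n width) := by rw [hflat]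
      _ = _ := rfl

theorem pv_main_neg (n width : Int) (hw : width < 0) :
    boustrophedon n width = boustrophedon_alt n width := by
  rw [pv_A_eq_flatMap]
  unfold boustrophedon_alt
  rw [if_pos (by omega)]
  rw [List.flatMap_congr (g := fun _ => ([] : List Int))
    (fun row _ => pv_seg_neg n width hw row)]
  simp

-- ===== VERDICT (by name: the statement is the Claim_ definition above) =====
theorem boustrophedon_spec : Claim_equal_boustrophedon := by
  intro n width _ hpre
  unfold Spec_boustrophedon
  rcases lt_or_gt_of_ne hpre with hw | hw
  · exact pv_main_neg n width hw
  · exact pv_main_pos n width hw
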